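-- pv_equiv track=rewrite | github.com/drather/PS | exercise/programmers/Programmers_해시_폰켓몬.py | solution
-- ===== SOURCE A (Python) =====
-- def solution(nums):
--     monster_table = {}
--     target_num = len(nums) // 2
--
--     for num in nums:
--         monster_table.setdefault(num, 0)
--         monster_table[num] += 1
--
--     type_cnt = len(monster_table)
--
--     if target_num < type_cnt:
--         return target_num
--
--     return type_cnt
-- ===== SOURCE B (Python) =====
-- def solution(nums):
--     s = sorted(nums)
--     if s:
--         distinct = 1 + sum(1 for a, b in zip(s, s[1:]) if a != b)
--     else:
--         distinct = 0
--     return min(len(nums) // 2, distinct)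
-- ===== Notes on version B (the rewrite author's own statement) =====
-- stated objective: alternative
-- what changed: Replaces the dict-accumulation pass (count table, then compare its size with len//2) by sort-then-scan: sorted copy, distinct count = 1 + number of adjacent changes, returned as min(len//2, distinct).
import Mathlib
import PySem

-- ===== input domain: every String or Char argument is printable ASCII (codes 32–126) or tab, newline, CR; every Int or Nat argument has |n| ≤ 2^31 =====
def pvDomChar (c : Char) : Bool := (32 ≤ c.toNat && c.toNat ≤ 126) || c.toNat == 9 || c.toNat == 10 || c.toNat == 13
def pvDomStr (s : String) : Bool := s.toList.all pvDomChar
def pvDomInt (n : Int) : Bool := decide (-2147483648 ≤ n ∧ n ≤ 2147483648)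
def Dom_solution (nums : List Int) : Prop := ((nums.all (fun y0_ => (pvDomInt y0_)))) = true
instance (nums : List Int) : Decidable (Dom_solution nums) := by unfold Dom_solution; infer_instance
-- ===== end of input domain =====

-- B replaces A's dict-accumulation (count table, compare its size with len//2) by sort-then-scan:
-- distinct = 1 + number of adjacent changes in sorted(nums), result = min(len//2, distinct). Objective: alternative.

-- ===== PORT A =====
def solution (nums : List Int) : Int :=
  let monster_table : PySem.Dict Int Int := PySem.Dict.empty
  let target_num : Int := PySem.Int.floordiv (nums.length : Int) 2
  let monster_table := nums.foldl
    (fun d num => (d.setdefault num 0).modify num 0 (fun v => v + 1)) monster_table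
  let type_cnt : Int := (monster_table.size : Int)
  if target_num < type_cnt then target_num else type_cnt

-- ===== PORT B =====
def solution_alt (nums : List Int) : Int :=
  let s := PySem.List.sorted nums (fun x => x) false
  let distinct : Int :=
    if s ≠ [] then
      1 + (((s.zip (PySem.List.slice s (some 1) none)).countP (fun p => p.1 != p.2) : Nat) : Int)
    else 0
  min (PySem.Int.floordiv (nums.length : Int) 2) distinct

-- ===== PRECONDITION & SPEC =====
def Spec_solution (nums : List Int) (out : Int) : Prop := out = solution_alt nums
instance (nums : List Int) (out : Int) : Decidable (Spec_solution nums out) := by unfold Spec_solution; infer_instance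

-- ===== CLAIM (what is proved, stated in full; the proofs are below) =====
def Claim_equal_solution : Prop := ∀ (nums : List Int), Dom_solution nums → Spec_solution nums (solution nums)

-- ===== LEMMAS AND PROOFS =====

-- A's loop step (setdefault then += 1) is the single counter-modify step.
theorem step_eq (d : PySem.Dict Int Int) (x : Int) :
    (d.setdefault x 0).modify x 0 (fun v => v + 1) = d.modify x 0 (fun v => v + 1) := by
  by_cases h : d.contains x = true
  · rw [PySem.Dict.setdefault_of_contains d (k := x) 0 h]
  · have h0 : d.get? x = none := by
      rw [PySem.Dict.get?_eq_none_iff_contains]; simpa using h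
    apply PySem.Dict.ext
    rw [PySem.Dict.setdefault_of_not_contains d (k := x) 0 (by simpa using h)]
    simp [PySem.Dict.modify, PySem.Dict.getD, PySem.Dict.get?_insert_self,
      PySem.Dict.insert_insert_self, h0]

-- the ordered dedup has as many elements as the finset of the list
theorem len_ofList (xs : List Int) : (PySem.Set.ofList xs).length = xs.toFinset.card := by
  have hfs : (PySem.Set.ofList xs).toFinset = xs.toFinset := by
    ext a; simp [List.mem_toFinset, PySem.Set.mem_ofList]
  rw [← hfs, List.toFinset_card_of_nodup (PySem.Set.nodup_ofList xs)]

-- A's table has one entry per distinct element of nums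
theorem sizeA (nums : List Int) :
    (nums.foldl (fun d num => (d.setdefault num 0).modify num 0 (fun v => v + 1))
        (PySem.Dict.empty : PySem.Dict Int Int)).size = nums.toFinset.card := by
  have hfold : nums.foldl (fun d num => (d.setdefault num 0).modify num 0 (fun v => v + 1))
        (PySem.Dict.empty : PySem.Dict Int Int)
      = nums.foldl (fun d num => d.modify num 0 (fun v => v + 1))
        (PySem.Dict.empty : PySem.Dict Int Int) := by
    exact PySem.List.foldl_congr_mem nums _ _ _ (fun d x _ => step_eq d x)
  rw [hfold]
  have hk : (nums.foldl (fun d num => d.modify num 0 (fun v => v + 1))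
        (PySem.Dict.empty : PySem.Dict Int Int)).keys = PySem.Set.ofList nums := by
    have := PySem.Dict.keys_counter (xs := nums)
    rwa [PySem.Dict.counter_eq_foldl] at this
  have hsz : (nums.foldl (fun d num => d.modify num 0 (fun v => v + 1))
        (PySem.Dict.empty : PySem.Dict Int Int)).size
      = (nums.foldl (fun d num => d.modify num 0 (fun v => v + 1))
        (PySem.Dict.empty : PySem.Dict Int Int)).keys.length := by
    simp [PySem.Dict.size, PySem.Dict.keys]
  rw [hsz, hk, len_ofList]

-- on a sorted list, 1 + (number of adjacent changes) counts the distinct elements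
theorem adjCount (s : List Int) (hs : s.Pairwise (· ≤ ·)) (hne : s ≠ []) :
    1 + (s.zip s.tail).countP (fun p => p.1 != p.2) = s.toFinset.card := by
  induction s with
  | nil => simp at hne
  | cons a t ih =>
    cases t with
    | nil => simp
    | cons b u =>
      have hab : a ≤ b := (List.pairwise_cons.mp hs).1 b (by simp)
      have hbu : ∀ y ∈ u, b ≤ y := fun y hy =>
        (List.pairwise_cons.mp (List.pairwise_cons.mp hs).2).1 y hy
      have hih := ih (List.pairwise_cons.mp hs).2 (by simp)
      by_cases h : a = b
      · have : a ∈ (b :: u).toFinset := by simp [h]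
        rw [List.toFinset_cons, Finset.insert_eq_self.mpr this, ← hih]
        simp [h]
      · have hau : a ∉ u := fun hh => h (le_antisymm hab (hbu a hh))
        have : a ∉ (b :: u).toFinset := by simp [h, hau]
        rw [List.toFinset_cons, Finset.card_insert_of_notMem this, ← hih]
        simp [h]
        omega

-- ===== VERDICT (by name: the statement is the Claim_ definition above) =====
theorem solution_spec : Claim_equal_solution := by
  intro nums _
  simp only [Spec_solution, solution, solution_alt, PySem.List.slice_from_one]
  rw [sizeA]
  by_cases hnil : nums = []
  · subst hnil; decide
  · have hsne : PySem.List.sorted nums (fun x => x) false ≠ [] := by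
      simp [PySem.List.sorted_eq_nil_iff, hnil]
    have hpw : (PySem.List.sorted nums (fun x => x) false).Pairwise (· ≤ ·) := by
      simpa using PySem.List.sorted_pairwise nums (fun x => x)
    have hperm : (PySem.List.sorted nums (fun x => x) false).Perm nums :=
      PySem.List.sorted_perm nums (fun x => x) false
    have hadj := adjCount _ hpw hsne
    rw [List.toFinset_eq_of_perm _ _ hperm] at hadj
    have hc : (1 : Int) + (((PySem.List.sorted nums (fun x => x) false).zip
        (PySem.List.sorted nums (fun x => x) false).tail).countP (fun p => p.1 != p.2) : Nat)
        = (nums.toFinset.card : Int) := by exact_mod_cast hadj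
    rw [if_pos hsne, hc, min_def]
    split_ifs <;> omega
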